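-- pv_equiv track=rewrite | github.com/julian4554/DokCleaningTool | src/text_processing.py | ersetze_umlaute
-- ===== SOURCE A (Python) =====
-- def ersetze_umlaute(text):
--     """
--         Ersetzt Umlaute in einem Text.
--         Args:
--             text (str): Der Text, in dem Umlaute ersetzt werden sollen.
--         Returns:
--             str: Der Text mit ersetzen Umlauten.
--         """
--     umlaute = {
--         'ae': 'ä',
--         'oe': 'ö',
--         'ue': 'ü',
--         'Ae': 'Ä',
--         'Oe': 'Ö',
--         'Ue': 'Ü',
--         'sz': 'ß'
--     }
--     for ersatz, umlaut in umlaute.items():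
--         text = text.replace(ersatz, umlaut)
--     return text
-- ===== SOURCE B (Python) =====
-- def ersetze_umlaute(text):
--     umlaute = {
--         'ae': 'ä',
--         'oe': 'ö',
--         'ue': 'ü',
--         'Ae': 'Ä',
--         'Oe': 'Ö',
--         'Ue': 'Ü',
--         'sz': 'ß'
--     }
--     parts = []
--     i = 0
--     n = len(text)
--     while i < n:
--         rep = umlaute.get(text[i:i+2])
--         if rep is not None:
--             parts.append(rep)
--             i += 2
--         else:
--             parts.append(text[i])
--             i += 1
--     return ''.join(parts)
-- ===== Notes on version B (the rewrite author's own statement) =====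
-- stated objective: idiomatic
-- what changed: A runs seven sequential str.replace passes over the whole string (one per digraph); B builds the result in a single left-to-right scan with a 2-char lookahead into the digraph dict, appending either the replacement (advance 2) or the current char (advance 1).
import Mathlib
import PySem

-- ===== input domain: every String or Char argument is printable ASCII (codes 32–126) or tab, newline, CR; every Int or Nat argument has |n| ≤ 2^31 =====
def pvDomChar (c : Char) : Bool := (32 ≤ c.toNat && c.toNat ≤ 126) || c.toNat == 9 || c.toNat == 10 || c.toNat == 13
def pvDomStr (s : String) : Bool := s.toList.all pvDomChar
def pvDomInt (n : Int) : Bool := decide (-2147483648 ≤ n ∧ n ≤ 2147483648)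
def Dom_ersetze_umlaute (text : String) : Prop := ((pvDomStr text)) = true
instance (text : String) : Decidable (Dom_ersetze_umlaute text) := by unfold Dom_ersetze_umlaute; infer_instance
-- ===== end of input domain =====

-- B replaces A's seven sequential str.replace passes by a single left-to-right scan with
-- 2-char lookahead (objective: one pass instead of seven; exact same return value).

-- ===== PORT A =====
-- A's dict in insertion order; the loop 'for ersatz, umlaut in umlaute.items(): text = text.replace(...)'
def ersetze_umlaute (text : String) : String :=
  let umlaute : List (String × String) :=
    [("ae", "ä"), ("oe", "ö"), ("ue", "ü"), ("Ae", "Ä"), ("Oe", "Ö"), ("Ue", "Ü"), ("sz", "ß")]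
  umlaute.foldl (fun t p => PySem.Str.replace t p.1 p.2) text

-- ===== PORT B =====
-- Source B's dict of 2-char keys, as (first char, second char) ↦ replacement char
def bKeys : List ((Char × Char) × Char) :=
  [(('a','e'),'ä'), (('o','e'),'ö'), (('u','e'),'ü'),
   (('A','e'),'Ä'), (('O','e'),'Ö'), (('U','e'),'Ü'), (('s','z'),'ß')]

-- Source B's 'umlaute.get(text[i:i+2])' (first match in the association list)
def findRep : List ((Char × Char) × Char) → Char → Char → Option Char
  | [], _, _ => none
  | (p, u) :: rest, c1, c2 => if p.1 = c1 ∧ p.2 = c2 then some u else findRep rest c1 c2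

-- Source B's while-loop: look at the 2-char window; on a hit emit the replacement and advance
-- by 2, otherwise emit the current char and advance by 1
def scanK (ks : List ((Char × Char) × Char)) : List Char → List Char
  | c1 :: c2 :: t =>
    match findRep ks c1 c2 with
    | some u => u :: scanK ks t
    | none => c1 :: scanK ks (c2 :: t)
  | [c] => [c]
  | [] => []

def ersetze_umlaute_alt (text : String) : String :=
  String.ofList (scanK bKeys text.toList)

-- ===== PRECONDITION & SPEC =====
def Spec_ersetze_umlaute (text : String) (out : String) : Prop := out = ersetze_umlaute_alt text
instance (text : String) (out : String) : Decidable (Spec_ersetze_umlaute text out) := by unfold Spec_ersetze_umlaute; infer_instance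

-- ===== CLAIM (what is proved, stated in full; the proofs are below) =====
def Claim_equal_ersetze_umlaute : Prop := ∀ (text : String), Dom_ersetze_umlaute text → Spec_ersetze_umlaute text (ersetze_umlaute text)

-- ===== LEMMAS AND PROOFS =====

-- one unfolding step of PySem.Chars.replace.go on a cons, and the base cases
lemma go_cons (old new : List Char) (c : Char) (t acc : List Char) (fuel : Nat) :
    PySem.Chars.replace.go old new (fuel+1) (c::t) acc =
      if old.isPrefixOf (c::t) then
        PySem.Chars.replace.go old new fuel (List.drop old.length (c::t)) (new.reverse ++ acc)
      else PySem.Chars.replace.go old new fuel t (c::acc) := by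
  rw [PySem.Chars.replace.go]

lemma go_nil (old new acc : List Char) (fuel : Nat) :
    PySem.Chars.replace.go old new (fuel+1) [] acc = acc.reverse := by
  rw [PySem.Chars.replace.go]; simp

lemma go_zero (old new l acc : List Char) :
    PySem.Chars.replace.go old new 0 l acc = acc.reverse ++ l := by
  rw [PySem.Chars.replace.go]

-- the accumulator is a prefix that can be peeled off
lemma go_acc (old new : List Char) :
    ∀ (fuel : Nat) (l acc : List Char),
      PySem.Chars.replace.go old new fuel l acc =
        acc.reverse ++ PySem.Chars.replace.go old new fuel l [] := by
  intro fuel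
  induction fuel with
  | zero => intro l acc; rw [go_zero, go_zero]; simp
  | succ n ih =>
    intro l acc
    cases l with
    | nil => rw [go_nil, go_nil]; simp
    | cons c t =>
      rw [go_cons, go_cons]
      split
      · rw [ih _ (new.reverse ++ acc), ih _ (new.reverse ++ [])]
        simp
      · rw [ih _ (c :: acc), ih _ [c]]
        simp

-- fuel irrelevance once it covers the list length
lemma go_fuel (old new : List Char) (hold : old ≠ []) :
    ∀ (fuel fuel' : Nat) (l acc : List Char), l.length ≤ fuel → l.length ≤ fuel' →
      PySem.Chars.replace.go old new fuel l acc = PySem.Chars.replace.go old new fuel' l acc := by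
  intro fuel
  induction fuel with
  | zero =>
    intro fuel' l acc h1 h2
    have : l = [] := by cases l with | nil => rfl | cons a b => simp at h1
    subst this
    cases fuel' with
    | zero => rfl
    | succ m => rw [go_zero, go_nil]; simp
  | succ n ih =>
    intro fuel' l acc h1 h2
    cases l with
    | nil =>
      cases fuel' with
      | zero => rw [go_zero, go_nil]; simp
      | succ m => rw [go_nil, go_nil]
    | cons c t =>
      cases fuel' with
      | zero => simp at h2
      | succ m =>
        rw [go_cons, go_cons]
        have hol : 1 ≤ old.length := by
          cases old with | nil => exact absurd rfl hold | cons a b => simp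
        split
        · apply ih
          · rw [List.length_drop]; simp at h1 ⊢; omega
          · rw [List.length_drop]; simp at h2 ⊢; omega
        · apply ih
          · simp at h1 ⊢; omega
          · simp at h2 ⊢; omega

lemma replace_nil (old new : List Char) (hold : old ≠ []) :
    PySem.Chars.replace [] old new = [] := by
  rw [PySem.Chars.replace]
  simp [hold, go_zero]

lemma replace_cons_neg (old new : List Char) (hold : old ≠ []) (c : Char) (t : List Char)
    (h : old.isPrefixOf (c :: t) = false) :
    PySem.Chars.replace (c :: t) old new = c :: PySem.Chars.replace t old new := by
  have h0 : (old.isEmpty = true) = False := by simp [List.isEmpty_iff, hold]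
  rw [PySem.Chars.replace, PySem.Chars.replace]
  simp only [h0, if_false]
  have hl : (c :: t).length = t.length + 1 := by simp
  rw [hl, go_cons, h]
  simp only [Bool.false_eq_true, if_false]
  rw [go_acc old new _ _ [c]]
  rfl

lemma replace_match (old new : List Char) (hold : old ≠ []) (t : List Char) :
    PySem.Chars.replace (old ++ t) old new = new ++ PySem.Chars.replace t old new := by
  have h0 : (old.isEmpty = true) = False := by simp [List.isEmpty_iff, hold]
  rw [PySem.Chars.replace, PySem.Chars.replace]
  simp only [h0, if_false]
  obtain ⟨o, os, rfl⟩ : ∃ o os, old = o :: os := by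
    cases old with | nil => exact absurd rfl hold | cons o os => exact ⟨o, os, rfl⟩
  have hlen : ((o :: os) ++ t).length = (os.length + t.length) + 1 := by
    rw [List.length_append, List.length_cons]; omega
  rw [hlen]
  have hpre : (o :: os).isPrefixOf ((o :: os) ++ t) = true := by
    rw [List.isPrefixOf_iff_prefix]; exact List.prefix_append _ _
  rw [show ((o :: os) ++ t : List Char) = o :: (os ++ t) by simp] at hpre ⊢
  rw [go_cons, hpre]
  simp only [if_true]
  have hdrop : List.drop (o :: os).length (o :: (os ++ t)) = t := by
    simp
  rw [hdrop]
  rw [go_acc (o :: os) new (os.length + t.length) t (new.reverse ++ [])]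
  rw [go_fuel _ _ (by simp) (os.length + t.length) t.length t [] (by omega) (by omega)]
  simp

lemma replace_single (old new : List Char) (h2 : 2 ≤ old.length) (c : Char) :
    PySem.Chars.replace [c] old new = [c] := by
  have hold : old ≠ [] := by cases old with | nil => simp at h2 | cons a b => simp
  have hpre : old.isPrefixOf [c] = false := by
    cases hp : old.isPrefixOf [c] with
    | false => rfl
    | true =>
      have := (List.isPrefixOf_iff_prefix.mp hp).length_le
      simp at this; omega
  rw [replace_cons_neg old new hold c [] hpre, replace_nil old new hold]

-- 2-char pattern prefix test, spelled out
lemma isPrefixOf_two (k1 k2 x : Char) (xs : List Char) :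
    (([k1, k2] : List Char).isPrefixOf (x :: xs) = true) ↔ (x = k1 ∧ xs.head? = some k2) := by
  cases xs with
  | nil =>
    simp only [List.isPrefixOf, Bool.and_eq_true, beq_iff_eq, List.head?]
    simp [eq_comm]
  | cons y ys =>
    simp only [List.isPrefixOf, Bool.and_eq_true, beq_iff_eq, List.head?, Option.some.injEq]
    simp [eq_comm]

-- scanK unfoldings guided by the lookup result
lemma scanK_cons_some (ks : List ((Char × Char) × Char)) (c1 c2 u : Char) (t : List Char)
    (h : findRep ks c1 c2 = some u) : scanK ks (c1 :: c2 :: t) = u :: scanK ks t := by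
  rw [scanK, h]

lemma scanK_cons_none (ks : List ((Char × Char) × Char)) (c1 c2 : Char) (t : List Char)
    (h : findRep ks c1 c2 = none) : scanK ks (c1 :: c2 :: t) = c1 :: scanK ks (c2 :: t) := by
  rw [scanK, h]

-- findRep on an appended key list: first list wins
lemma findRep_append (ks ks' : List ((Char × Char) × Char)) (c1 c2 : Char) :
    findRep (ks ++ ks') c1 c2 =
      match findRep ks c1 c2 with | some u => some u | none => findRep ks' c1 c2 := by
  induction ks with
  | nil => simp [findRep]
  | cons p rest ih =>
    rw [List.cons_append, findRep, findRep]
    split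
    · rfl
    · exact ih

-- a hit of findRep names a replacement stored in the list
lemma findRep_mem (ks : List ((Char × Char) × Char)) (c1 c2 : Char) (u : Char)
    (h : findRep ks c1 c2 = some u) : ∃ p ∈ ks, p.2 = u := by
  induction ks with
  | nil => simp [findRep] at h
  | cons q rest ih =>
    rw [findRep] at h
    split at h
    · exact ⟨q, by simp, by injection h⟩
    · obtain ⟨p, hp, he⟩ := ih h
      exact ⟨p, by simp [hp], he⟩

-- the head of a scan is the original head or one of the (non-domain) replacement chars
lemma scanK_head (ks : List ((Char × Char) × Char))
    (hrep : ∀ p ∈ ks, pvDomChar p.2 = false) (s : List Char) :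
    (scanK ks s).head? = s.head? ∨
      ∃ d, (scanK ks s).head? = some d ∧ pvDomChar d = false := by
  cases s with
  | nil => left; rfl
  | cons c1 t =>
    cases t with
    | nil => left; rfl
    | cons c2 t' =>
      rw [scanK]
      cases hf : findRep ks c1 c2 with
      | none => left; rfl
      | some u =>
        right
        obtain ⟨p, hp, he⟩ := findRep_mem ks c1 c2 u hf
        exact ⟨u, rfl, he ▸ hrep p hp⟩

lemma scanK_nil_keys (s : List Char) : scanK [] s = s := by
  induction s with
  | nil => rfl
  | cons c t ih =>
    cases t with
    | nil => rfl
    | cons c2 t' => rw [scanK]; simp [findRep]; rw [ih]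

-- a second char that starts no key is passed over unchanged
lemma scanK_cons_second (ks : List ((Char × Char) × Char)) (c2 : Char)
    (hsecond : ∀ p ∈ ks, p.1.1 ≠ c2) (t : List Char) :
    scanK ks (c2 :: t) = c2 :: scanK ks t := by
  cases t with
  | nil => rfl
  | cons t0 t' =>
    rw [scanK]
    have : findRep ks c2 t0 = none := by
      induction ks with
      | nil => rfl
      | cons p rest ih =>
        rw [findRep]
        have h1 : ¬ (p.1.1 = c2 ∧ p.1.2 = t0) := fun h => hsecond p (by simp) h.1
        rw [if_neg h1]
        exact ih (fun q hq => hsecond q (by simp [hq]))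
    rw [this]

-- one replace pass over a scan with key set ks equals the scan with that key appended
lemma step_key (ks : List ((Char × Char) × Char)) (k1 k2 u : Char)
    (hrep : ∀ p ∈ ks, pvDomChar p.2 = false)
    (hk1 : pvDomChar k1 = true) (hk2 : pvDomChar k2 = true)
    (hsecond : ∀ p ∈ ks, p.1.1 ≠ k2) :
    ∀ (n : Nat) (s : List Char), s.length ≤ n →
      PySem.Chars.replace (scanK ks s) [k1, k2] [u] = scanK (ks ++ [((k1, k2), u)]) s := by
  intro n
  induction n with
  | zero =>
    intro s hlen
    have : s = [] := by cases s with | nil => rfl | cons a b => simp at hlen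
    subst this
    rw [scanK, scanK, replace_nil _ _ (by simp)]
  | succ n ih =>
    intro s hlen
    cases s with
    | nil => rw [scanK, scanK, replace_nil _ _ (by simp)]
    | cons c1 t =>
      cases t with
      | nil =>
        rw [scanK, scanK, replace_single _ _ (by simp) c1]
      | cons c2 t' =>
        have hlt : t'.length ≤ n := by simp at hlen; omega
        have hlc : (c2 :: t').length ≤ n := by simp at hlen ⊢; omega
        cases hf : findRep ks c1 c2 with
        | some uj =>
          -- an earlier key matched: its replacement char is not k1, the pass walks over it
          obtain ⟨p, hp, he⟩ := findRep_mem ks c1 c2 uj hf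
          have huj : uj ≠ k1 := by
            intro h; rw [h] at he; rw [← he] at hk1; exact absurd (hrep p hp) (by simp [hk1])
          have hpre : ([k1, k2] : List Char).isPrefixOf (uj :: scanK ks t') = false := by
            apply eq_false_of_ne_true
            intro hp2
            exact huj ((isPrefixOf_two k1 k2 uj _).mp hp2).1
          have hf' : findRep (ks ++ [((k1, k2), u)]) c1 c2 = some uj := by
            rw [findRep_append, hf]
          rw [scanK_cons_some ks c1 c2 uj t' hf, scanK_cons_some _ c1 c2 uj t' hf',
              replace_cons_neg _ _ (by simp) _ _ hpre, ih t' hlt]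
        | none =>
          by_cases hck : c1 = k1 ∧ c2 = k2
          · -- this position matches the new key: the pass replaces it
            obtain ⟨rfl, rfl⟩ := hck
            have hf' : findRep (ks ++ [((c1, c2), u)]) c1 c2 = some u := by
              rw [findRep_append, hf]; simp [findRep]
            rw [scanK_cons_none ks c1 c2 t' hf, scanK_cons_second ks c2 hsecond t',
                scanK_cons_some _ c1 c2 u t' hf']
            have hsplit : (c1 :: c2 :: scanK ks t') = [c1, c2] ++ scanK ks t' := rfl
            rw [hsplit, replace_match _ _ (by simp), ih t' hlt]
            rfl
          · -- no key matches here: the pass walks over c1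
            have hpre : ([k1, k2] : List Char).isPrefixOf (c1 :: scanK ks (c2 :: t')) = false := by
              apply eq_false_of_ne_true
              intro hp2
              obtain ⟨he1, he2⟩ := (isPrefixOf_two k1 k2 c1 _).mp hp2
              rcases scanK_head ks hrep (c2 :: t') with hh | ⟨d, hd, hdna⟩
              · rw [hh] at he2
                injection he2 with he2
                exact hck ⟨he1, he2⟩
              · rw [hd] at he2
                injection he2 with he2
                rw [he2] at hdna
                rw [hdna] at hk2
                exact Bool.false_ne_true hk2
            have hf' : findRep (ks ++ [((k1, k2), u)]) c1 c2 = none := by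
              rw [findRep_append, hf]
              have hne : ¬ (k1 = c1 ∧ k2 = c2) := fun h => hck ⟨h.1.symm, h.2.symm⟩
              simp only [findRep, if_neg hne]
            rw [scanK_cons_none ks c1 c2 t' hf, scanK_cons_none _ c1 c2 t' hf',
                replace_cons_neg _ _ (by simp) _ _ hpre, ih (c2 :: t') hlc]

-- ===== VERDICT (by name: the statement is the Claim_ definition above) =====
theorem ersetze_umlaute_spec : Claim_equal_ersetze_umlaute := by
  intro text _
  unfold Spec_ersetze_umlaute ersetze_umlaute ersetze_umlaute_alt
  simp only [List.foldl]
  rw [PySem.Str.replace]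
  refine congrArg String.ofList ?_
  rw [PySem.Str.toList_replace, PySem.Str.toList_replace, PySem.Str.toList_replace,
      PySem.Str.toList_replace, PySem.Str.toList_replace, PySem.Str.toList_replace]
  set s := text.toList with hs
  have e1 := step_key [] 'a' 'e' 'ä' (by decide) (by decide) (by decide)
      (by decide) s.length s (le_refl _)
  rw [scanK_nil_keys] at e1
  have e2 := step_key [(('a','e'),'ä')] 'o' 'e' 'ö' (by decide) (by decide)
      (by decide) (by decide) s.length s (le_refl _)
  have e3 := step_key [(('a','e'),'ä'), (('o','e'),'ö')] 'u' 'e' 'ü' (by decide)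
      (by decide) (by decide) (by decide) s.length s (le_refl _)
  have e4 := step_key [(('a','e'),'ä'), (('o','e'),'ö'), (('u','e'),'ü')] 'A' 'e' 'Ä'
      (by decide) (by decide) (by decide) (by decide) s.length s (le_refl _)
  have e5 := step_key [(('a','e'),'ä'), (('o','e'),'ö'), (('u','e'),'ü'), (('A','e'),'Ä')]
      'O' 'e' 'Ö' (by decide) (by decide) (by decide) (by decide)
      s.length s (le_refl _)
  have e6 := step_key [(('a','e'),'ä'), (('o','e'),'ö'), (('u','e'),'ü'), (('A','e'),'Ä'),
      (('O','e'),'Ö')] 'U' 'e' 'Ü' (by decide) (by decide) (by decide)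
      (by decide) s.length s (le_refl _)
  have e7 := step_key [(('a','e'),'ä'), (('o','e'),'ö'), (('u','e'),'ü'), (('A','e'),'Ä'),
      (('O','e'),'Ö'), (('U','e'),'Ü')] 's' 'z' 'ß' (by decide) (by decide)
      (by decide) (by decide) s.length s (le_refl _)
  simp only [show ("ae" : String).toList = ['a','e'] from rfl,
      show ("oe" : String).toList = ['o','e'] from rfl,
      show ("ue" : String).toList = ['u','e'] from rfl,
      show ("Ae" : String).toList = ['A','e'] from rfl,
      show ("Oe" : String).toList = ['O','e'] from rfl,
      show ("Ue" : String).toList = ['U','e'] from rfl,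
      show ("sz" : String).toList = ['s','z'] from rfl,
      show ("ä" : String).toList = ['ä'] from rfl,
      show ("ö" : String).toList = ['ö'] from rfl,
      show ("ü" : String).toList = ['ü'] from rfl,
      show ("Ä" : String).toList = ['Ä'] from rfl,
      show ("Ö" : String).toList = ['Ö'] from rfl,
      show ("Ü" : String).toList = ['Ü'] from rfl,
      show ("ß" : String).toList = ['ß'] from rfl]
  rw [e1]; simp only [List.nil_append]
  rw [e2]; simp only [List.cons_append, List.nil_append]
  rw [e3]; simp only [List.cons_append, List.nil_append]
  rw [e4]; simp only [List.cons_append, List.nil_append]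
  rw [e5]; simp only [List.cons_append, List.nil_append]
  rw [e6]; simp only [List.cons_append, List.nil_append]
  rw [e7]
  rfl
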